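-- pv_equiv track=rewrite | github.com/nowsword/ProjectEuler | p044.py | P_index
-- ===== SOURCE A (Python) =====
-- def P(n):
--     return n * (3 * n - 1) // 2
--
-- def P_index(val):
--     if val <= 0:
--         return 0
--     beg = 1
--     end = val
--     while beg <= end:
--         mid = (beg + end) // 2
--         P_mid = P(mid)
--         if P_mid == val:
--             return mid
--         if P_mid > val:
--             end = mid - 1
--         else:
--             beg = mid + 1
--     return 0
-- ===== SOURCE B (Python) =====
-- import math
--
-- def P_index(val):
--     if val <= 0:
--         return 0
--     d = 1 + 24 * val
--     s = math.isqrt(d)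
--     if s * s == d and (1 + s) % 6 == 0:
--         return (1 + s) // 6
--     return 0
-- ===== Notes on version B (the rewrite author's own statement) =====
-- stated objective: simpler
-- what changed: Replaced the binary search over the candidate range with the closed-form inverse of the pentagonal formula: an exact integer-square-root (math.isqrt) perfect-square and divisibility test decides pentagonality and yields the index directly, with no loop.
import Mathlib
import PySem

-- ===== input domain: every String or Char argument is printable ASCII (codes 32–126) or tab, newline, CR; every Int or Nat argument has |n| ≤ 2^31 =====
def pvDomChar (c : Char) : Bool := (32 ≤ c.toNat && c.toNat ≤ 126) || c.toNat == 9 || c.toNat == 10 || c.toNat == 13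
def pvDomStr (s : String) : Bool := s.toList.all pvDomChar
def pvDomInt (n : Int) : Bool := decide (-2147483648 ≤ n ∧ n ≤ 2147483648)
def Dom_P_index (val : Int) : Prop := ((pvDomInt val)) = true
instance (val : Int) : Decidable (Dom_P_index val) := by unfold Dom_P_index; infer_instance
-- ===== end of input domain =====

-- B replaces A's binary search by the closed-form inverse of the pentagonal formula
-- (an exact integer-square-root pentagonality test, no loop); objective: simpler.

-- ===== PORT A =====
def pyP (n : Int) : Int := PySem.Int.floordiv (n * (3 * n - 1)) 2

-- A's 'while beg <= end' loop; the fuel (val.toNat in P_index) bounds the interval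
-- length, which shrinks every iteration, so the fuel is never exhausted.
def P_loop : Nat → Int → Int → Int → Int
  | 0, _, _, _ => 0
  | fuel + 1, val, beg, e =>
    if beg ≤ e then
      let mid := PySem.Int.floordiv (beg + e) 2
      let pmid := pyP mid
      if pmid = val then mid
      else if pmid > val then P_loop fuel val beg (mid - 1)
      else P_loop fuel val (mid + 1) e
    else 0

def P_index (val : Int) : Int :=
  if val ≤ 0 then 0
  else P_loop val.toNat val 1 val

-- ===== PORT B =====
-- math.isqrt(d) for d ≥ 0 is exactly Nat.sqrt d.toNat (floor integer square root).
def P_index_alt (val : Int) : Int :=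
  if val ≤ 0 then 0
  else
    let d := 1 + 24 * val
    let s : Int := (Nat.sqrt d.toNat : Int)
    if s * s = d ∧ PySem.Int.mod (1 + s) 6 = 0 then PySem.Int.floordiv (1 + s) 6
    else 0

-- ===== PRECONDITION & SPEC =====
def Spec_P_index (val : Int) (out : Int) : Prop := out = P_index_alt val
instance (val : Int) (out : Int) : Decidable (Spec_P_index val out) := by unfold Spec_P_index; infer_instance

-- ===== CLAIM (what is proved, stated in full; the proofs are below) =====
def Claim_equal_P_index : Prop := ∀ (val : Int), Dom_P_index val → Spec_P_index val (P_index val)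

-- ===== LEMMAS AND PROOFS =====

theorem pyP_eval (n : Int) : 2 * pyP n = n * (3 * n - 1) := by
  have hdvd : (2:Int) ∣ n * (3 * n - 1) := by
    rcases Int.even_or_odd n with ⟨k, hk⟩ | ⟨k, hk⟩
    · exact ⟨k * (3 * n - 1), by rw [hk]; ring⟩
    · exact ⟨n * (3 * k + 1), by rw [hk]; ring⟩
  unfold pyP
  rw [PySem.Int.floordiv_eq_ediv_of_pos (by omega : (0:Int) < 2)]
  omega

theorem pyP_strictMono {a b : Int} (ha : 1 ≤ a) (hab : a < b) : pyP a < pyP b := by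
  have := pyP_eval a
  have := pyP_eval b
  nlinarith

-- If P n = val with n ≥ 1 lies in the (sufficiently fuelled) search interval, the loop finds n.
theorem P_loop_finds (val n : Int) (hn : 1 ≤ n) (hval : pyP n = val) :
    ∀ (fuel : Nat) (beg e : Int), (e + 1 - beg).toNat ≤ fuel →
      1 ≤ beg → beg ≤ n → n ≤ e → P_loop fuel val beg e = n := by
  intro fuel
  induction fuel with
  | zero => intro beg e hf hbeg hbn hne; omega
  | succ fuel ih =>
    intro beg e hf hbeg hbn hne
    have hbe : beg ≤ e := le_trans hbn hne
    rw [P_loop]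
    simp only [hbe, if_pos]
    have hmid := PySem.Int.floordiv_two_mid_bounds (lo := beg) (hi := e) hbe
    set mid := PySem.Int.floordiv (beg + e) 2 with hm
    split_ifs with h1 h2
    · -- mid = n by strict monotonicity
      by_contra hne'
      rcases lt_or_gt_of_ne hne' with h | h
      · have := pyP_strictMono (by omega : 1 ≤ mid) h; omega
      · have := pyP_strictMono hn h; omega
    · -- pyP mid > val, so n < mid
      have hlt : n < mid := by
        by_contra h
        rcases eq_or_lt_of_le (not_lt.mp h) with h' | h'
        · exact h1 (h' ▸ hval)
        · have := pyP_strictMono (by omega : 1 ≤ mid) h'; omega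
      exact ih beg (mid - 1) (by omega) hbeg hbn (by omega)
    · have hlt : mid < n := by
        by_contra h
        rcases eq_or_lt_of_le (not_lt.mp h) with h' | h'
        · exact h1 (h' ▸ hval)
        · have := pyP_strictMono hn h'; omega
      exact ih (mid + 1) e (by omega) (by omega) (by omega) hne
-- If no n ≥ 1 has P n = val, the loop (running over indices ≥ 1) returns 0.
theorem P_loop_misses (val : Int) (hno : ∀ n : Int, 1 ≤ n → pyP n ≠ val) :
    ∀ (fuel : Nat) (beg e : Int), 1 ≤ beg → P_loop fuel val beg e = 0 := by
  intro fuel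
  induction fuel with
  | zero => intro beg e hbeg; rfl
  | succ fuel ih =>
    intro beg e hbeg
    rw [P_loop]
    by_cases hbe : beg ≤ e
    · simp only [hbe, if_pos]
      have hmid := PySem.Int.floordiv_two_mid_bounds (lo := beg) (hi := e) hbe
      set mid := PySem.Int.floordiv (beg + e) 2 with hm
      split_ifs with h1 h2
      · exact absurd h1 (hno mid (by omega))
      · exact ih beg (mid - 1) hbeg
      · exact ih (mid + 1) e (by omega)
    · simp [hbe]

-- ===== VERDICT (by name: the statement is the Claim_ definition above) =====
theorem P_index_spec : Claim_equal_P_index := by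
  unfold Claim_equal_P_index
  intro val _
  unfold Spec_P_index P_index P_index_alt
  by_cases hv : val ≤ 0
  · simp [hv]
  · simp only [hv, if_false]
    replace hv : 0 < val := by omega
    set d : Int := 1 + 24 * val with hd
    have hd0 : (0:Int) ≤ d := by omega
    have hdcast : ((d.toNat : Nat) : Int) = d := by omega
    set s : Int := (Nat.sqrt d.toNat : Int) with hs
    have hs0 : 0 ≤ s := by positivity
    have hslo : s * s ≤ d := by
      have h : Nat.sqrt d.toNat * Nat.sqrt d.toNat ≤ d.toNat := by
        have := Nat.sqrt_le' d.toNat; nlinarith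
      rw [hs, ← hdcast]
      exact_mod_cast h
    have hshi : d < (s + 1) * (s + 1) := by
      have h : d.toNat < (Nat.sqrt d.toNat + 1) * (Nat.sqrt d.toNat + 1) := Nat.lt_succ_sqrt d.toNat
      rw [hs, ← hdcast]
      exact_mod_cast h
    by_cases hcond : s * s = d ∧ PySem.Int.mod (1 + s) 6 = 0
    · -- B returns m := (1+s)//6 ≥ 1 with pyP m = val; A finds it.
      simp only [hcond, and_self, if_true]
      obtain ⟨hsq, hmod⟩ := hcond
      rw [PySem.Int.mod_eq_emod_of_pos (by omega : (0:Int) < 6)] at hmod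
      set m : Int := PySem.Int.floordiv (1 + s) 6 with hmdef
      have hm6 : 6 * m = 1 + s := by
        rw [hmdef, PySem.Int.floordiv_eq_ediv_of_pos (by omega : (0:Int) < 6)]
        omega
      have hm1 : 1 ≤ m := by nlinarith
      have hPm : pyP m = val := by
        have h2 := pyP_eval m
        nlinarith
      exact P_loop_finds val m hm1 hPm val.toNat 1 val (by omega) (by omega) (by omega)
        (by have := pyP_eval m; nlinarith)
    · -- B returns 0; no n ≥ 1 solves pyP n = val, so A returns 0.
      simp only [hcond, if_false]
      apply P_loop_misses
      · intro n hn hPn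
        apply hcond
        have h2 := pyP_eval n
        have hv2 : 2 * val = n * (3 * n - 1) := by rw [← hPn]; exact h2
        have hsq : (6 * n - 1) * (6 * n - 1) = d := by
          rw [hd]; linear_combination (-12) * hv2
        have hsval : s = 6 * n - 1 := by
          have hc1 : ((6 * n - 1).toNat : Int) = 6 * n - 1 := by omega
          have hnat : (6 * n - 1).toNat * (6 * n - 1).toNat = d.toNat := by
            have : (((6 * n - 1).toNat * (6 * n - 1).toNat : Nat) : Int) = ((d.toNat : Nat) : Int) := by
              push_cast
              rw [hc1, hdcast]
              exact hsq
            exact_mod_cast this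
          rw [hs, ← hnat, Nat.sqrt_eq]
          omega
        constructor
        · rw [hsval]; linear_combination (-12) * hv2
        · rw [PySem.Int.mod_eq_emod_of_pos (by omega : (0:Int) < 6), hsval]
          omega
      · omega
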